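-- pv_equiv track=rewrite | github.com/Masterfar7/100points | hard.py | ryd
-- ===== SOURCE A (Python) =====
-- def ryd(n):
--     ss=0
--     while n>0:
--         if(n%10)%2==0:
--             ss+=1
--             if ss>1:
--                 return 0
--         else:
--             ss-=1
--             if ss<0:
--                 ss=0
--         n=n//10
--     return 1
-- ===== SOURCE B (Python) =====
-- def ryd(n):
--     if n <= 0:
--         return 1
--     ds = []
--     m = n
--     while m > 0:
--         ds.append(m % 10)
--         m = m // 10
--     return 0 if any(a % 2 == 0 and b % 2 == 0 for a, b in zip(ds, ds[1:])) else 1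
-- ===== Notes on version B (the rewrite author's own statement) =====
-- stated objective: alternative
-- what changed: Replaced the stateful saturating counter loop (with early return) by extracting the digit list once and testing whether any two adjacent digits are both even, which is exactly when A returns 0.
import Mathlib
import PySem

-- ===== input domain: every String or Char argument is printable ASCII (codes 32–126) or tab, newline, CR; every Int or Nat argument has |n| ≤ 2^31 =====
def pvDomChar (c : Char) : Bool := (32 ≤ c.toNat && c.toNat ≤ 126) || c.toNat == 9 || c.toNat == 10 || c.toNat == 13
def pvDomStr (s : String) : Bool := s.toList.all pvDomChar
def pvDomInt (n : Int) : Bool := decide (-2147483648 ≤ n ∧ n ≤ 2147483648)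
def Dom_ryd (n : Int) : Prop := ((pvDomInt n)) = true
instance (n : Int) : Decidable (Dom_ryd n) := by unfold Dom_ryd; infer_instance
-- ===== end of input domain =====

-- B replaces A's saturating counter loop by a direct "two adjacent even digits" test on the digit list (objective: alternative, same cost).

-- ===== PORT A =====
-- the while loop, step for step: state ss, early return 0, n = n // 10 each round
def rydLoop (n : Int) (ss : Int) : Int :=
  if h : n > 0 then
    if PySem.Int.mod (PySem.Int.mod n 10) 2 = 0 then
      if ss + 1 > 1 then 0
      else rydLoop (PySem.Int.floordiv n 10) (ss + 1)
    else
      rydLoop (PySem.Int.floordiv n 10) (if ss - 1 < 0 then 0 else ss - 1)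
  else 1
termination_by n.toNat
decreasing_by
  all_goals
    rw [PySem.Int.floordiv_eq_ediv_of_pos (by omega : (0:Int) < 10)]
    omega

def ryd (n : Int) : Int := rydLoop n 0

-- ===== PORT B =====
-- B's while loop building the low-to-high digit list
def pyDigits (n : Int) : List Int :=
  if h : n > 0 then PySem.Int.mod n 10 :: pyDigits (PySem.Int.floordiv n 10)
  else []
termination_by n.toNat
decreasing_by
  rw [PySem.Int.floordiv_eq_ediv_of_pos (by omega : (0:Int) < 10)]
  omega

-- B's any(... for a,b in zip(ds, ds[1:]))
def hasAdjEE : List Int → Bool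
  | a :: b :: rest =>
      (decide (PySem.Int.mod a 2 = 0) && decide (PySem.Int.mod b 2 = 0)) || hasAdjEE (b :: rest)
  | _ => false

def ryd_alt (n : Int) : Int :=
  if n ≤ 0 then 1
  else if hasAdjEE (pyDigits n) then 0 else 1

-- ===== PRECONDITION & SPEC =====
def Spec_ryd (n : Int) (out : Int) : Prop := out = ryd_alt n
instance (n : Int) (out : Int) : Decidable (Spec_ryd n out) := by unfold Spec_ryd; infer_instance

-- ===== CLAIM (what is proved, stated in full; the proofs are below) =====
def Claim_equal_ryd : Prop := ∀ (n : Int), Dom_ryd n → Spec_ryd n (ryd n)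

-- ===== LEMMAS AND PROOFS =====

-- is the first digit of the list even?
def headEven : List Int → Bool
  | a :: _ => decide (PySem.Int.mod a 2 = 0)
  | [] => false

theorem hasAdjEE_cons (x : Int) (l : List Int) :
    hasAdjEE (x :: l) = ((decide (PySem.Int.mod x 2 = 0) && headEven l) || hasAdjEE l) := by
  cases l with
  | nil => simp [hasAdjEE, headEven]
  | cons b rest => simp [hasAdjEE, headEven]

theorem pyDigits_pos {n : Int} (h : n > 0) :
    pyDigits n = PySem.Int.mod n 10 :: pyDigits (PySem.Int.floordiv n 10) := by
  rw [pyDigits]; simp [h]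

theorem pyDigits_nonpos {n : Int} (h : ¬ n > 0) : pyDigits n = [] := by
  rw [pyDigits]; simp [h]

-- loop invariant: for ss ∈ {0,1}, the loop returns 0 exactly when
-- (ss = 1 and the next digit is even) or two adjacent digits of n are both even
theorem rydLoop_eq (k : Nat) :
    ∀ n ss : Int, n.toNat ≤ k → (ss = 0 ∨ ss = 1) →
      rydLoop n ss =
        if ((decide (ss = 1) && headEven (pyDigits n)) || hasAdjEE (pyDigits n)) then 0 else 1 := by
  induction k with
  | zero =>
    intro n ss hk _
    have hn : ¬ n > 0 := by omega
    rw [rydLoop]; simp [hn, pyDigits_nonpos hn, headEven, hasAdjEE]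
  | succ k ih =>
    intro n ss hk hss
    by_cases hn : n > 0
    · have hm : (PySem.Int.floordiv n 10).toNat ≤ k := by
        rw [PySem.Int.floordiv_eq_ediv_of_pos (by omega : (0:Int) < 10)]
        omega
      have hd := pyDigits_pos hn
      rw [rydLoop]
      by_cases he : PySem.Int.mod (PySem.Int.mod n 10) 2 = 0
      · -- digit even
        have hed : decide (PySem.Int.mod (PySem.Int.mod n 10) 2 = 0) = true :=
          decide_eq_true he
        have he2 : n % 10 % 2 = 0 := by
          rwa [PySem.Int.mod_eq_emod_of_pos (by omega : (0:Int) < 10),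
               PySem.Int.mod_eq_emod_of_pos (by omega : (0:Int) < 2)] at he
        rcases hss with h0 | h1
        · subst h0
          simp only [hn, dite_true, he, if_true]
          have : ¬ ((0:Int) + 1 > 1) := by omega
          rw [if_neg this, ih _ _ hm (Or.inr (by norm_num))]
          rw [hd, hasAdjEE_cons, hed]
          simp
        · subst h1
          simp only [hn, dite_true, he, if_true]
          rw [if_pos (by omega : (1:Int) + 1 > 1)]
          rw [hd]
          simp [headEven, he2]
      · -- digit odd
        have hed : decide (PySem.Int.mod (PySem.Int.mod n 10) 2 = 0) = false :=
          decide_eq_false he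
        have he2 : ¬ (n % 10 % 2 = 0) := by
          rwa [PySem.Int.mod_eq_emod_of_pos (by omega : (0:Int) < 10),
               PySem.Int.mod_eq_emod_of_pos (by omega : (0:Int) < 2)] at he
        have hz : (if ss - 1 < 0 then (0:Int) else ss - 1) = 0 := by
          rcases hss with h0 | h1 <;> subst_vars <;> norm_num
        simp only [hn, dite_true, he, if_false]
        rw [hz, ih _ _ hm (Or.inl rfl)]
        have h2 : ¬ (2 ∣ n) := by omega
        rw [hd, hasAdjEE_cons, hed]
        simp [headEven, he2, h2]
    · rw [rydLoop]; simp [hn, pyDigits_nonpos hn, headEven, hasAdjEE]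

-- ===== VERDICT (by name: the statement is the Claim_ definition above) =====
theorem ryd_spec : Claim_equal_ryd := by
  unfold Claim_equal_ryd Spec_ryd
  intro n _
  unfold ryd ryd_alt
  rw [rydLoop_eq n.toNat n 0 le_rfl (Or.inl rfl)]
  by_cases hn : n ≤ 0
  · have : ¬ n > 0 := by omega
    simp [hn, pyDigits_nonpos this, headEven, hasAdjEE]
  · simp [hn]
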